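-- pv_equiv track=rewrite | github.com/bomi0320/baekjoon | 1495.py | volumn
-- ===== SOURCE A (Python) =====
-- def volumn(n, s, m, v):
--     dp = [[] for i in range(n+1)]
--     dp[0].append(s)
--
--     for i in range(1, n+1):
--         for before in dp[i-1]:
--             temp1 = before + v[i]
--             temp2 = before - v[i]
--             if 0 <= temp1 <= m:
--                 if temp1 not in dp[i]:
--                     dp[i].append(temp1)
--             if 0 <= temp2 <= m:
--                 if temp2 not in dp[i]:
--                     dp[i].append(temp2)
--         if len(dp[i]) == 0:
--             return -1
--
--     return max(dp[n])
-- ===== SOURCE B (Python) =====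
-- def _merge_clip(a, b, m):
--     # merge two ascending lists into one ascending duplicate-free list,
--     # keeping only values inside [0, m]
--     out = []
--     i = j = 0
--     while i < len(a) or j < len(b):
--         if j >= len(b) or (i < len(a) and a[i] <= b[j]):
--             x = a[i]; i += 1
--         else:
--             x = b[j]; j += 1
--         if 0 <= x <= m and (not out or out[-1] != x):
--             out.append(x)
--     return out
--
--
-- def volumn(n, s, m, v):
--     # invariant: cur is the strictly increasing list of reachable volumes
--     cur = [s]
--     for i in range(1, n + 1):
--         vi = v[i]
--         cur = _merge_clip([b + vi for b in cur], [b - vi for b in cur], m)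
--         if not cur:
--             return -1
--     return cur[-1]
-- ===== Notes on version B (the rewrite author's own statement) =====
-- stated objective: alternative
-- what changed: B replaces A's unordered per-layer lists built by scatter with a linear 'not in' dedup scan per insertion by a strictly sorted layer rebuilt each song with a two-pointer merge of its two shifted copies (clipping to [0,m] and dedup happen inside the merge, no membership test anywhere), and returns the last element of the sorted layer instead of max(); Pre_ excludes n<0 and n>=len(v) (A raises IndexError on dp[0] / v[i]) but readmits runs whose first step already dies; still excluded are n>=len(v) runs dying only at a later step, where both programs return -1.
-- outside the precondition, e.g. on volumn(5, 0, 3, [0, 1, 5]): A returns -1, B returns -1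
import Mathlib
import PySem

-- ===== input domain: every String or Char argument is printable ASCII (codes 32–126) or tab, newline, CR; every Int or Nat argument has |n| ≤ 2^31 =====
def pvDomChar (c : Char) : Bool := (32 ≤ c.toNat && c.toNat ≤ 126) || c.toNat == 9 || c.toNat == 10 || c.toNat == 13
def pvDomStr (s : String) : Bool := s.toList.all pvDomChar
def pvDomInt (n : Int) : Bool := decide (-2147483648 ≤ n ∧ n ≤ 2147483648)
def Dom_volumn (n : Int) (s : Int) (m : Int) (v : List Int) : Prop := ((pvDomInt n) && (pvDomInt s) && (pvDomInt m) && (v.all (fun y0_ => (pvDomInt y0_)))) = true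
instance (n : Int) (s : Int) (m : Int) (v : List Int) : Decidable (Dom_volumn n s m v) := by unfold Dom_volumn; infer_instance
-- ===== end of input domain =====

-- ===== PORT A =====
-- B replaces A's unordered per-layer lists (scatter + linear `not in` dedup) by a
-- strictly sorted layer rebuilt each song by a two-pointer merge of its two shifted
-- copies (clipping and dedup happen inside the merge), answering by the last element
-- of the sorted layer instead of max() (objective: alternative algorithm, no membership scans).

-- inner loop of A: for before in dp[i-1]: append temp1/temp2 to dp[i] if in [0,m] and not already there
def volumnInner (m : Int) (vi : Int) (prev : List Int) : List Int :=
  prev.foldl (fun cur before =>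
    let temp1 := before + vi
    let temp2 := before - vi
    let cur1 := if 0 ≤ temp1 ∧ temp1 ≤ m then (if temp1 ∈ cur then cur else cur ++ [temp1]) else cur
    if 0 ≤ temp2 ∧ temp2 ≤ m then (if temp2 ∈ cur1 then cur1 else cur1 ++ [temp2]) else cur1) []

-- outer loop of A over i in range(1, n+1); `none` = the early `return -1`
def volumnOuter (m : Int) (v : List Int) (is_ : List Int) (prev : List Int) : Option (List Int) :=
  match is_ with
  | [] => some prev
  | i :: rest =>
      let vi := (PySem.List.pyGet? v i).getD 0   -- in range whenever Pre_ holds (A raises IndexError otherwise)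
      let cur := volumnInner m vi prev
      if cur.length = 0 then none
      else volumnOuter m v rest cur

def volumn (n : Int) (s : Int) (m : Int) (v : List Int) : Int :=
  match volumnOuter m v (PySem.List.pyRange 1 (n + 1) 1) [s] with
  | none => -1
  | some last => (PySem.List.max? last (fun x => x)).getD 0   -- max(dp[n]); dp[n] is never empty here

-- ===== PORT B =====
-- append x to out when x ∈ [0,m] and not equal to the last element already there
def volumnPush (m : Int) (out : List Int) (x : Int) : List Int :=
  if 0 ≤ x ∧ x ≤ m ∧ (out = [] ∨ (PySem.List.pyGet? out (-1)).getD 0 ≠ x) then out ++ [x] else out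

-- the two-pointer merge loop of _merge_clip (branch order as in Python's while body)
def volumnMerge (m : Int) : List Int → List Int → List Int → List Int
  | [], [], out => out
  | x :: a, [], out => volumnMerge m a [] (volumnPush m out x)
  | [], y :: b, out => volumnMerge m [] b (volumnPush m out y)
  | x :: a, y :: b, out =>
      if x ≤ y then volumnMerge m a (y :: b) (volumnPush m out x)
      else volumnMerge m (x :: a) b (volumnPush m out y)
  termination_by a b _ => a.length + b.length

-- loop over i in range(1, n+1); afterwards return cur[-1]
def volumnAltLoop (m : Int) (v : List Int) (is_ : List Int) (cur : List Int) : Int :=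
  match is_ with
  | [] => (PySem.List.pyGet? cur (-1)).getD 0   -- cur[-1]; cur is never empty here
  | i :: rest =>
      let vi := (PySem.List.pyGet? v i).getD 0
      let nxt := volumnMerge m (cur.map (fun b => b + vi)) (cur.map (fun b => b - vi)) []
      if nxt.isEmpty then -1 else volumnAltLoop m v rest nxt

def volumn_alt (n : Int) (s : Int) (m : Int) (v : List Int) : Int :=
  volumnAltLoop m v (PySem.List.pyRange 1 (n + 1) 1) [s]

-- ===== PRECONDITION & SPEC =====
-- Pre_ excludes n < 0 (A raises IndexError on dp[0]) and the n ≥ len(v) inputs where A's v[i]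
-- access raises IndexError; the last disjunct readmits the runs whose very first step already dies
-- (both s±v[1] outside [0,m]: A returns -1 at i=1 without reaching the missing index); still
-- excluded are n ≥ len(v) runs that die only at a later step (there both programs return -1) —
-- whether the run reaches the missing index is not a closed-form shape of the input.
def Pre_volumn (n : Int) (s : Int) (m : Int) (v : List Int) : Prop :=
  0 ≤ n ∧ (n = 0 ∨ n < (v.length : Int) ∨
    (2 ≤ v.length ∧ ¬(0 ≤ s + v.getD 1 0 ∧ s + v.getD 1 0 ≤ m) ∧ ¬(0 ≤ s - v.getD 1 0 ∧ s - v.getD 1 0 ≤ m)))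
instance (n : Int) (s : Int) (m : Int) (v : List Int) : Decidable (Pre_volumn n s m v) := by unfold Pre_volumn; infer_instance
def pvWitness_volumn : Int × Int × Int × List Int := (2, 5, 10, [0, 2, 3])

def Spec_volumn (n : Int) (s : Int) (m : Int) (v : List Int) (out : Int) : Prop := out = volumn_alt n s m v
instance (n : Int) (s : Int) (m : Int) (v : List Int) (out : Int) : Decidable (Spec_volumn n s m v out) := by unfold Spec_volumn; infer_instance

-- ===== CLAIM (what is proved, stated in full; the proofs are below) =====
def Claim_equal_volumn : Prop := ∀ (n : Int) (s : Int) (m : Int) (v : List Int), Dom_volumn n s m v → Pre_volumn n s m v → Spec_volumn n s m v (volumn n s m v)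

-- ===== LEMMAS AND PROOFS =====

theorem volumn_maybeAdd_mem (cond : Prop) [Decidable cond] (cur : List Int) (t x : Int) :
    x ∈ (if cond then (if t ∈ cur then cur else cur ++ [t]) else cur) ↔ x ∈ cur ∨ (x = t ∧ cond) := by
  split_ifs <;> simp [List.mem_append] <;> aesop

theorem volumn_step_mem (m vi before x : Int) (cur : List Int) :
    x ∈ (let temp1 := before + vi
         let temp2 := before - vi
         let cur1 := if 0 ≤ temp1 ∧ temp1 ≤ m then (if temp1 ∈ cur then cur else cur ++ [temp1]) else cur
         if 0 ≤ temp2 ∧ temp2 ≤ m then (if temp2 ∈ cur1 then cur1 else cur1 ++ [temp2]) else cur1)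
    ↔ x ∈ cur ∨ ((x = before + vi ∨ x = before - vi) ∧ 0 ≤ x ∧ x ≤ m) := by
  rw [volumn_maybeAdd_mem, volumn_maybeAdd_mem]
  constructor
  · rintro ((hc | ⟨rfl, h1, h2⟩) | ⟨rfl, h1, h2⟩)
    · exact Or.inl hc
    · exact Or.inr ⟨Or.inl rfl, h1, h2⟩
    · exact Or.inr ⟨Or.inr rfl, h1, h2⟩
  · rintro (hc | ⟨rfl | rfl, h1, h2⟩)
    · exact Or.inl (Or.inl hc)
    · exact Or.inl (Or.inr ⟨rfl, h1, h2⟩)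
    · exact Or.inr ⟨rfl, h1, h2⟩

theorem volumn_inner_aux (m vi x : Int) : ∀ (prev cur : List Int),
    x ∈ prev.foldl (fun cur before =>
      let temp1 := before + vi
      let temp2 := before - vi
      let cur1 := if 0 ≤ temp1 ∧ temp1 ≤ m then (if temp1 ∈ cur then cur else cur ++ [temp1]) else cur
      if 0 ≤ temp2 ∧ temp2 ≤ m then (if temp2 ∈ cur1 then cur1 else cur1 ++ [temp2]) else cur1) cur
    ↔ x ∈ cur ∨ ∃ b ∈ prev, (x = b + vi ∨ x = b - vi) ∧ 0 ≤ x ∧ x ≤ m := by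
  intro prev
  induction prev with
  | nil => intro cur; simp
  | cons b rest ih =>
      intro cur
      rw [List.foldl_cons, ih, volumn_step_mem]
      constructor
      · rintro (hh | hh)
        · rcases hh with hh | hh
          · exact Or.inl hh
          · exact Or.inr ⟨b, List.mem_cons_self, hh⟩
        · rcases hh with ⟨c, hc, hrest⟩
          exact Or.inr ⟨c, List.mem_cons_of_mem _ hc, hrest⟩
      · rintro (hh | ⟨c, hc, hrest⟩)
        · exact Or.inl (Or.inl hh)
        · rcases List.mem_cons.mp hc with rfl | hc
          · exact Or.inl (Or.inr hrest)
          · exact Or.inr ⟨c, hc, hrest⟩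

theorem mem_volumnInner (m vi x : Int) (prev : List Int) :
    x ∈ volumnInner m vi prev ↔ ∃ b ∈ prev, (x = b + vi ∨ x = b - vi) ∧ 0 ≤ x ∧ x ≤ m := by
  unfold volumnInner
  rw [volumn_inner_aux]
  simp

-- Python's cur[-1] is the last element
theorem volumn_pyGet_neg_one (l : List Int) (h : l ≠ []) : PySem.List.pyGet? l (-1) = l.getLast? := by
  have h1 : 1 ≤ l.length := List.length_pos_of_ne_nil h
  simp [PySem.List.pyGet?, PySem.List.pyIdx?, h1, List.getLast?_eq_getElem?]

-- in a strictly sorted list whose elements are all ≤ x, a last element ≠ x makes every element < x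
theorem volumn_lt_of_last_ne : ∀ (l : List Int) (x : Int), l.Pairwise (· < ·) →
    (∀ y ∈ l, y ≤ x) → l.getLast? ≠ some x → ∀ y ∈ l, y < x := by
  intro l
  induction l with
  | nil => simp
  | cons a t ih =>
      intro x hp hle hne y hy
      cases t with
      | nil =>
          simp only [List.mem_singleton] at hy
          subst hy
          have h1 : y ≤ x := hle y (by simp)
          have h2 : y ≠ x := by
            intro hEq; exact hne (by simp [hEq])
          omega
      | cons b t' =>
          have hne' : (b :: t').getLast? ≠ some x := by
            rwa [List.getLast?_cons_cons] at hne
          have htail : ∀ z ∈ b :: t', z < x :=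
            ih x hp.of_cons (fun z hz => hle z (List.mem_cons_of_mem _ hz)) hne'
          rcases List.mem_cons.mp hy with rfl | hy'
          · have hab : y < b := (List.pairwise_cons.mp hp).1 b List.mem_cons_self
            have hbx : b < x := htail b List.mem_cons_self
            omega
          · exact htail y hy'

-- every element of a strictly sorted list is ≤ its last element
theorem volumn_le_last : ∀ (l : List Int) (L : Int), l.Pairwise (· < ·) →
    l.getLast? = some L → ∀ y ∈ l, y ≤ L := by
  intro l
  induction l with
  | nil => simp
  | cons a t ih =>
      intro L hp hL y hy
      cases t with
      | nil =>
          simp only [List.getLast?_singleton, Option.some_inj] at hL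
          simp only [List.mem_singleton] at hy
          omega
      | cons b t' =>
          rw [List.getLast?_cons_cons] at hL
          have htail := ih L hp.of_cons hL
          rcases List.mem_cons.mp hy with rfl | hy'
          · have hab : y < b := (List.pairwise_cons.mp hp).1 b List.mem_cons_self
            have hbL : b ≤ L := htail b List.mem_cons_self
            omega
          · exact htail y hy'

-- what one push does, under the merge invariant
theorem volumn_push_spec (m x : Int) (out : List Int)
    (hp : out.Pairwise (· < ·)) (hb : ∀ y ∈ out, 0 ≤ y ∧ y ≤ m) (hle : ∀ y ∈ out, y ≤ x) :
    (volumnPush m out x).Pairwise (· < ·) ∧ (∀ y ∈ volumnPush m out x, 0 ≤ y ∧ y ≤ m) ∧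
    (∀ y ∈ volumnPush m out x, y ≤ x) ∧
    (∀ z, z ∈ volumnPush m out x ↔ z ∈ out ∨ (z = x ∧ 0 ≤ x ∧ x ≤ m)) := by
  unfold volumnPush
  split_ifs with h
  · obtain ⟨hx0, hx1, hor⟩ := h
    have hlt : ∀ y ∈ out, y < x := by
      rcases hor with h0 | hne
      · subst h0; simp
      · rcases List.eq_nil_or_concat out with h0 | ⟨t, z, hcat⟩
        · subst h0; simp
        · rw [List.concat_eq_append] at hcat
          subst hcat
          have hnn : t ++ [z] ≠ [] := by simp
          rw [volumn_pyGet_neg_one _ hnn, List.getLast?_concat] at hne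
          refine volumn_lt_of_last_ne _ x hp hle ?_
          rw [List.getLast?_concat]
          simp only [Option.getD_some] at hne
          simp [hne]
    refine ⟨?_, ?_, ?_, ?_⟩
    · rw [List.pairwise_append]
      exact ⟨hp, by simp, by simpa using hlt⟩
    · intro y hy
      rcases List.mem_append.mp hy with hy | hy
      · exact hb y hy
      · simp only [List.mem_singleton] at hy; subst hy; exact ⟨hx0, hx1⟩
    · intro y hy
      rcases List.mem_append.mp hy with hy | hy
      · exact hle y hy
      · simp only [List.mem_singleton] at hy; omega
    · intro z
      simp only [List.mem_append, List.mem_singleton]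
      constructor
      · rintro (hz | rfl)
        · exact Or.inl hz
        · exact Or.inr ⟨rfl, hx0, hx1⟩
      · rintro (hz | ⟨rfl, _, _⟩)
        · exact Or.inl hz
        · exact Or.inr rfl
  · refine ⟨hp, hb, hle, fun z => ⟨fun hz => Or.inl hz, ?_⟩⟩
    rintro (hz | ⟨rfl, h0, h1⟩)
    · exact hz
    push Not at h
    obtain ⟨hnn, hlast⟩ := h h0 h1
    rcases List.eq_nil_or_concat out with h0' | ⟨t, w, hcat⟩
    · exact absurd h0' hnn
    · rw [List.concat_eq_append] at hcat
      subst hcat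
      rw [volumn_pyGet_neg_one _ (by simp), List.getLast?_concat] at hlast
      simp only [Option.getD_some] at hlast
      subst hlast
      simp

-- the merge produces the strictly sorted clip of a ∪ b appended after out
theorem volumn_merge_spec (m : Int) : ∀ (a b out : List Int),
    a.Pairwise (· ≤ ·) → b.Pairwise (· ≤ ·) → out.Pairwise (· < ·) →
    (∀ y ∈ out, 0 ≤ y ∧ y ≤ m) →
    (∀ y ∈ out, ∀ z ∈ a, y ≤ z) → (∀ y ∈ out, ∀ z ∈ b, y ≤ z) →
    (volumnMerge m a b out).Pairwise (· < ·) ∧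
    (∀ y ∈ volumnMerge m a b out, 0 ≤ y ∧ y ≤ m) ∧
    (∀ z, z ∈ volumnMerge m a b out ↔ z ∈ out ∨ ((z ∈ a ∨ z ∈ b) ∧ 0 ≤ z ∧ z ≤ m)) := by
  intro a b out
  induction a, b, out using volumnMerge.induct (m := m) with
  | case1 out' =>
      intro ha hb hp hbd _ _
      rw [volumnMerge]
      refine ⟨hp, hbd, fun z => ⟨fun hz => Or.inl hz, ?_⟩⟩
      rintro (hz | ⟨hz, _, _⟩)
      · exact hz
      · simp at hz
  | case2 x a out' ih =>
      intro ha hb hp hbd hra _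
      rw [volumnMerge]
      have hle : ∀ y ∈ out', y ≤ x := fun y hy => hra y hy x List.mem_cons_self
      obtain ⟨p1, p2, p3, p4⟩ := volumn_push_spec m x out' hp hbd hle
      have hra' : ∀ y ∈ volumnPush m out' x, ∀ z ∈ a, y ≤ z := by
        intro y hy z hz
        rcases (p4 y).mp hy with hy' | ⟨rfl, _, _⟩
        · exact hra y hy' z (List.mem_cons_of_mem _ hz)
        · exact List.rel_of_pairwise_cons ha hz
      obtain ⟨q1, q2, q3⟩ := ih ha.of_cons hb p1 p2 hra' (by simp)
      refine ⟨q1, q2, fun z => ?_⟩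
      rw [q3 z, p4 z]
      constructor
      · rintro ((hz | ⟨rfl, h0, h1⟩) | ⟨hz, h0, h1⟩)
        · exact Or.inl hz
        · exact Or.inr ⟨Or.inl List.mem_cons_self, h0, h1⟩
        · rcases hz with hz | hz
          · exact Or.inr ⟨Or.inl (List.mem_cons_of_mem _ hz), h0, h1⟩
          · simp at hz
      · rintro (hz | ⟨hz, h0, h1⟩)
        · exact Or.inl (Or.inl hz)
        · rcases hz with hz | hz
          · rcases List.mem_cons.mp hz with rfl | hz'
            · exact Or.inl (Or.inr ⟨rfl, h0, h1⟩)
            · exact Or.inr ⟨Or.inl hz', h0, h1⟩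
          · simp at hz
  | case3 y b out' ih =>
      intro ha hb hp hbd _ hrb
      rw [volumnMerge]
      have hle : ∀ w ∈ out', w ≤ y := fun w hw => hrb w hw y List.mem_cons_self
      obtain ⟨p1, p2, p3, p4⟩ := volumn_push_spec m y out' hp hbd hle
      have hrb' : ∀ w ∈ volumnPush m out' y, ∀ z ∈ b, w ≤ z := by
        intro w hw z hz
        rcases (p4 w).mp hw with hw' | ⟨rfl, _, _⟩
        · exact hrb w hw' z (List.mem_cons_of_mem _ hz)
        · exact List.rel_of_pairwise_cons hb hz
      obtain ⟨q1, q2, q3⟩ := ih ha hb.of_cons p1 p2 (by simp) hrb'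
      refine ⟨q1, q2, fun z => ?_⟩
      rw [q3 z, p4 z]
      constructor
      · rintro ((hz | ⟨rfl, h0, h1⟩) | ⟨hz, h0, h1⟩)
        · exact Or.inl hz
        · exact Or.inr ⟨Or.inr List.mem_cons_self, h0, h1⟩
        · rcases hz with hz | hz
          · simp at hz
          · exact Or.inr ⟨Or.inr (List.mem_cons_of_mem _ hz), h0, h1⟩
      · rintro (hz | ⟨hz, h0, h1⟩)
        · exact Or.inl (Or.inl hz)
        · rcases hz with hz | hz
          · simp at hz
          · rcases List.mem_cons.mp hz with rfl | hz'
            · exact Or.inl (Or.inr ⟨rfl, h0, h1⟩)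
            · exact Or.inr ⟨Or.inr hz', h0, h1⟩
  | case4 x a y b out' hxy ih =>
      intro ha hb hp hbd hra hrb
      rw [volumnMerge]
      rw [if_pos hxy]
      have hle : ∀ w ∈ out', w ≤ x := fun w hw => hra w hw x List.mem_cons_self
      obtain ⟨p1, p2, p3, p4⟩ := volumn_push_spec m x out' hp hbd hle
      have hra' : ∀ w ∈ volumnPush m out' x, ∀ z ∈ a, w ≤ z := by
        intro w hw z hz
        rcases (p4 w).mp hw with hw' | ⟨rfl, _, _⟩
        · exact hra w hw' z (List.mem_cons_of_mem _ hz)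
        · exact List.rel_of_pairwise_cons ha hz
      have hrb' : ∀ w ∈ volumnPush m out' x, ∀ z ∈ y :: b, w ≤ z := by
        intro w hw z hz
        rcases (p4 w).mp hw with hw' | ⟨rfl, _, _⟩
        · exact hrb w hw' z hz
        · rcases List.mem_cons.mp hz with rfl | hz'
          · exact hxy
          · exact le_trans hxy (List.rel_of_pairwise_cons hb hz')
      obtain ⟨q1, q2, q3⟩ := ih ha.of_cons hb p1 p2 hra' hrb'
      refine ⟨q1, q2, fun z => ?_⟩
      rw [q3 z, p4 z]
      constructor
      · rintro ((hz | ⟨rfl, h0, h1⟩) | ⟨hz, h0, h1⟩)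
        · exact Or.inl hz
        · exact Or.inr ⟨Or.inl List.mem_cons_self, h0, h1⟩
        · rcases hz with hz | hz
          · exact Or.inr ⟨Or.inl (List.mem_cons_of_mem _ hz), h0, h1⟩
          · exact Or.inr ⟨Or.inr hz, h0, h1⟩
      · rintro (hz | ⟨hz, h0, h1⟩)
        · exact Or.inl (Or.inl hz)
        · rcases hz with hz | hz
          · rcases List.mem_cons.mp hz with rfl | hz'
            · exact Or.inl (Or.inr ⟨rfl, h0, h1⟩)
            · exact Or.inr ⟨Or.inl hz', h0, h1⟩
          · exact Or.inr ⟨Or.inr hz, h0, h1⟩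
  | case5 x a y b out' hxy ih =>
      intro ha hb hp hbd hra hrb
      rw [volumnMerge]
      rw [if_neg hxy]
      have hyx : y ≤ x := by omega
      have hle : ∀ w ∈ out', w ≤ y := fun w hw => hrb w hw y List.mem_cons_self
      obtain ⟨p1, p2, p3, p4⟩ := volumn_push_spec m y out' hp hbd hle
      have hra' : ∀ w ∈ volumnPush m out' y, ∀ z ∈ x :: a, w ≤ z := by
        intro w hw z hz
        rcases (p4 w).mp hw with hw' | ⟨rfl, _, _⟩
        · exact hra w hw' z hz
        · rcases List.mem_cons.mp hz with rfl | hz'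
          · exact hyx
          · exact le_trans hyx (List.rel_of_pairwise_cons ha hz')
      have hrb' : ∀ w ∈ volumnPush m out' y, ∀ z ∈ b, w ≤ z := by
        intro w hw z hz
        rcases (p4 w).mp hw with hw' | ⟨rfl, _, _⟩
        · exact hrb w hw' z (List.mem_cons_of_mem _ hz)
        · exact List.rel_of_pairwise_cons hb hz
      obtain ⟨q1, q2, q3⟩ := ih ha hb.of_cons p1 p2 hra' hrb'
      refine ⟨q1, q2, fun z => ?_⟩
      rw [q3 z, p4 z]
      constructor
      · rintro ((hz | ⟨rfl, h0, h1⟩) | ⟨hz, h0, h1⟩)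
        · exact Or.inl hz
        · exact Or.inr ⟨Or.inr List.mem_cons_self, h0, h1⟩
        · rcases hz with hz | hz
          · exact Or.inr ⟨Or.inl hz, h0, h1⟩
          · exact Or.inr ⟨Or.inr (List.mem_cons_of_mem _ hz), h0, h1⟩
      · rintro (hz | ⟨hz, h0, h1⟩)
        · exact Or.inl (Or.inl hz)
        · rcases hz with hz | hz
          · exact Or.inr ⟨Or.inl hz, h0, h1⟩
          · rcases List.mem_cons.mp hz with rfl | hz'
            · exact Or.inl (Or.inr ⟨rfl, h0, h1⟩)
            · exact Or.inr ⟨Or.inr hz', h0, h1⟩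

-- main loop invariant: A's outer loop on a layer list = B's loop on the sorted layer
theorem volumn_loop_eq (m : Int) (v : List Int) : ∀ (is_ : List Int) (prev cur : List Int),
    prev ≠ [] → cur.Pairwise (· < ·) → (∀ z, z ∈ cur ↔ z ∈ prev) →
    (match volumnOuter m v is_ prev with
     | none => (-1 : Int)
     | some last => (PySem.List.max? last (fun x => x)).getD 0) = volumnAltLoop m v is_ cur := by
  intro is_
  induction is_ with
  | nil =>
      intro prev cur hne hp hmem
      simp only [volumnOuter, volumnAltLoop]
      have hcne : cur ≠ [] := by
        rcases List.exists_mem_of_ne_nil _ hne with ⟨w, hw⟩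
        intro h0
        have := (hmem w).mpr hw
        rw [h0] at this
        exact List.not_mem_nil this
      rcases List.eq_nil_or_concat cur with h0 | ⟨t, L, hcat⟩
      · exact absurd h0 hcne
      rw [List.concat_eq_append] at hcat
      subst hcat
      rw [volumn_pyGet_neg_one _ (by simp), List.getLast?_concat]
      have hL : L ∈ t ++ [L] := by simp
      cases hmx : PySem.List.max? prev (fun x => x) with
      | none => exact absurd ((PySem.List.max?_eq_none_iff _ _).mp hmx) hne
      | some mx =>
          have hmx1 : mx ∈ prev := PySem.List.max?_mem hmx
          have h1 : mx ≤ L :=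
            volumn_le_last _ L hp (List.getLast?_concat) mx ((hmem mx).mpr hmx1)
          have h2 : L ≤ mx := PySem.List.max?_isMax hmx L ((hmem L).mp hL)
          simp [le_antisymm h1 h2]
  | cons i rest ih =>
      intro prev cur hne hp hmem
      simp only [volumnOuter, volumnAltLoop]
      obtain ⟨q1, q2, q3⟩ := volumn_merge_spec m
        (cur.map (fun b => b + (PySem.List.pyGet? v i).getD 0))
        (cur.map (fun b => b - (PySem.List.pyGet? v i).getD 0)) []
        (List.pairwise_map.mpr (hp.imp (by omega)))
        (List.pairwise_map.mpr (hp.imp (by omega)))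
        (by simp) (by simp) (by simp) (by simp)
      have hmem' : ∀ z, z ∈ volumnMerge m
          (cur.map (fun b => b + (PySem.List.pyGet? v i).getD 0))
          (cur.map (fun b => b - (PySem.List.pyGet? v i).getD 0)) []
          ↔ z ∈ volumnInner m ((PySem.List.pyGet? v i).getD 0) prev := by
        intro z
        rw [q3 z, mem_volumnInner]
        simp only [List.not_mem_nil, false_or, List.mem_map]
        constructor
        · rintro ⟨⟨bb, hbb, rfl⟩ | ⟨bb, hbb, rfl⟩, h0, h1⟩
          · exact ⟨bb, (hmem bb).mp hbb, Or.inl rfl, h0, h1⟩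
          · exact ⟨bb, (hmem bb).mp hbb, Or.inr rfl, h0, h1⟩
        · rintro ⟨bb, hbb, rfl | rfl, h0, h1⟩
          · exact ⟨Or.inl ⟨bb, (hmem bb).mpr hbb, rfl⟩, h0, h1⟩
          · exact ⟨Or.inr ⟨bb, (hmem bb).mpr hbb, rfl⟩, h0, h1⟩
      by_cases hemp : volumnInner m ((PySem.List.pyGet? v i).getD 0) prev = []
      · have hmerge_nil : volumnMerge m
            (cur.map (fun b => b + (PySem.List.pyGet? v i).getD 0))
            (cur.map (fun b => b - (PySem.List.pyGet? v i).getD 0)) [] = [] := by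
          rw [List.eq_nil_iff_forall_not_mem]
          intro z hz
          have := (hmem' z).mp hz
          rw [hemp] at this
          exact List.not_mem_nil this
        rw [if_pos (by rw [hemp]; rfl), if_pos (by rw [hmerge_nil]; rfl)]
      · have hlen : ¬ ((volumnInner m ((PySem.List.pyGet? v i).getD 0) prev).length = 0) := by
          simpa [List.length_eq_zero_iff] using hemp
        have hmerge_ne : ¬ ((volumnMerge m
            (cur.map (fun b => b + (PySem.List.pyGet? v i).getD 0))
            (cur.map (fun b => b - (PySem.List.pyGet? v i).getD 0)) []).isEmpty = true) := by
          rw [List.isEmpty_iff]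
          intro h0
          rcases List.exists_mem_of_ne_nil _ hemp with ⟨z, hz⟩
          have := (hmem' z).mpr hz
          rw [h0] at this
          exact List.not_mem_nil this
        rw [if_neg hlen, if_neg hmerge_ne]
        exact ih _ _ hemp q1 hmem'

-- ===== VERDICT (by name: the statement is the Claim_ definition above) =====
theorem volumn_spec : Claim_equal_volumn := by
  intro n s m v _hdom _hpre
  unfold Spec_volumn volumn volumn_alt
  exact volumn_loop_eq m v (PySem.List.pyRange 1 (n + 1) 1) [s] [s]
    (List.cons_ne_nil s []) (by simp) (fun z => Iff.rfl)
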